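-- pv_equiv track=rewrite | github.com/HICE-CodingTestStudy/solved | additionalProblem/week54/Emol/BOJ 5904 Moo 게임.py | find_moo
-- ===== SOURCE A (Python) =====
-- def moo_length(k):
--     if k == 0:
--         return 3
--     else:
--         return 2 * moo_length(k - 1) + k + 3
--
-- def find_moo(n, k):
--     if k == 0:
--         if n == 1:
--             return "m"
--         else:
--             return "o"
--
--     prev_length = moo_length(k - 1)
--     middle_length = k + 3
--
--     if n <= prev_length:
--         return find_moo(n, k - 1)
--     elif n <= prev_length + middle_length:
--         if n == prev_length + 1:
--             return "m"
--         else: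
--             return "o"
--
--     else:
--         return find_moo(n - prev_length - middle_length, k - 1)
-- ===== SOURCE B (Python) =====
-- def find_moo(n, k):
--     # Precompute lengths[i] = length of moo(i) once, then descend the levels iteratively.
--     lengths = [3]
--     for i in range(1, k):
--         lengths.append(2 * lengths[-1] + i + 3)
--     for level in range(k, 0, -1):
--         prev = lengths[level - 1]
--         mid = level + 3
--         if n <= prev:
--             continue
--         elif n <= prev + mid:
--             return "m" if n == prev + 1 else "o"
--         else:
--             n -= prev + mid
--     return "m" if n == 1 else "o"
-- ===== Notes on version B (the rewrite author's own statement) =====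
-- stated objective: faster
-- what changed: B precomputes the moo-length table once in a single O(k) pass and then descends the levels with an iterative loop, instead of A's recursive descent that re-runs the recursive moo_length from scratch at every level (O(k^2) calls).
import Mathlib
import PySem

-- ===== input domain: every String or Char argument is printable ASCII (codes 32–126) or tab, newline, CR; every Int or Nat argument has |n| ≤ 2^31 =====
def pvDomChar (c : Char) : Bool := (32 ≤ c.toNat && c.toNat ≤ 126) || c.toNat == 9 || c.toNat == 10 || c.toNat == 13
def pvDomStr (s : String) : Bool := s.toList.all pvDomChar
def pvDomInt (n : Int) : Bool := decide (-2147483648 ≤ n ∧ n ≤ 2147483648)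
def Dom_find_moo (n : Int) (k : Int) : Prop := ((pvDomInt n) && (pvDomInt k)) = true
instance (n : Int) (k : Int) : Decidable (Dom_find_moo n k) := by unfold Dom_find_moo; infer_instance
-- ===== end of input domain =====

-- B replaces A's O(k^2) recursive descent (which re-runs recursive moo_length at every level)
-- by one O(k) precomputed length table plus an iterative descent loop.

-- ===== PORT A =====
-- moo_length, recursion on k (indexed by k.toNat; Python diverges for k < 0, outside Pre_)
def mooLenAux : Nat → Int
  | 0 => 3
  | m + 1 => 2 * mooLenAux m + ((m : Int) + 1) + 3

def moo_length (k : Int) : Int := mooLenAux k.toNat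

-- find_moo's recursion on k, transliterated level by level
def findMooAux (n : Int) : Nat → String
  | 0 => if n = 1 then "m" else "o"
  | m + 1 =>
    let prev := moo_length (((m : Int) + 1) - 1)
    let mid := ((m : Int) + 1) + 3
    if n ≤ prev then findMooAux n m
    else if n ≤ prev + mid then
      (if n = prev + 1 then "m" else "o")
    else findMooAux (n - prev - mid) m

def find_moo (n : Int) (k : Int) : String := findMooAux n k.toNat

-- ===== PORT B =====
-- lengths = [3]; for i in range(1, k): lengths.append(2*lengths[-1] + i + 3)
def mooTable (k : Int) : List Int :=
  (PySem.List.pyRange 1 k 1).foldl (fun acc i => acc ++ [2 * acc.getLastD 0 + i + 3]) [3]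

-- one iteration of "for level in range(k, 0, -1)": the Option String carries an early return
def bStep (L : List Int) (st : Int × Option String) (level : Int) : Int × Option String :=
  match st.2 with
  | some _ => st
  | none =>
    let prev := L.getD (level - 1).toNat 0
    let mid := level + 3
    if st.1 ≤ prev then st
    else if st.1 ≤ prev + mid then (st.1, some (if st.1 = prev + 1 then "m" else "o"))
    else (st.1 - prev - mid, none)

-- the early return if any, else the final "m"/"o" on the remaining n
def bFinish (res : Int × Option String) : String :=
  match res.2 with
  | some s => s
  | none => if res.1 = 1 then "m" else "o"

def find_moo_alt (n : Int) (k : Int) : String :=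
  bFinish ((PySem.List.pyRange k 0 (-1)).foldl (bStep (mooTable k)) (n, none))

-- ===== PRECONDITION & SPEC =====
-- Pre_ excludes k < 0, on which A recurses without a base case (RecursionError).
def Pre_find_moo (n : Int) (k : Int) : Prop := 0 ≤ k
instance (n : Int) (k : Int) : Decidable (Pre_find_moo n k) := by unfold Pre_find_moo; infer_instance
def pvWitness_find_moo : Int × Int := (5, 2)

def Spec_find_moo (n : Int) (k : Int) (out : String) : Prop := out = find_moo_alt n k
instance (n : Int) (k : Int) (out : String) : Decidable (Spec_find_moo n k out) := by unfold Spec_find_moo; infer_instance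

-- ===== CLAIM (what is proved, stated in full; the proofs are below) =====
def Claim_equal_find_moo : Prop := ∀ (n : Int) (k : Int), Dom_find_moo n k → Pre_find_moo n k → Spec_find_moo n k (find_moo n k)

-- ===== LEMMAS AND PROOFS =====

-- the table built for bound (m+1) is exactly the map of mooLenAux over range (m+1)
theorem mooTable_eq (m : Nat) :
    mooTable ((m : Int) + 1) = (List.range (m + 1)).map mooLenAux := by
  induction m with
  | zero =>
    simp [mooTable, PySem.List.pyRange_one_eq_nil (by norm_num : (1:Int) ≤ 1),
      List.range_succ, mooLenAux]
  | succ m ih =>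
    have hsplit : PySem.List.pyRange 1 ((m : Int) + 1 + 1) 1
        = PySem.List.pyRange 1 ((m : Int) + 1) 1 ++ [(m : Int) + 1] :=
      PySem.List.pyRange_one_succ_right (by omega)
    have hlast : ((List.range (m + 1)).map mooLenAux).getLastD 0 = mooLenAux m := by
      simp [List.range_succ]
    unfold mooTable at ih ⊢
    push_cast
    rw [hsplit, List.foldl_append, ih, List.foldl_cons, List.foldl_nil, hlast]
    rw [List.range_succ (n := m + 1), List.map_append]
    simp [mooLenAux]

theorem mooTable_getD (k : Int) (i : Nat) (h : (i : Int) < k) :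
    (mooTable k).getD i 0 = mooLenAux i := by
  obtain ⟨m, hm⟩ : ∃ m : Nat, k = (m : Int) + 1 := by
    refine ⟨(k - 1).toNat, ?_⟩; omega
  subst hm
  rw [mooTable_eq]
  have hi : i < m + 1 := by omega
  simp [List.getD_eq_getElem?_getD, List.getElem?_map, List.getElem?_range hi]

-- once the fold has produced a result (early return), nothing changes any more
theorem bStep_frozen (L : List Int) (a : Int) (s : String) (xs : List Int) :
    xs.foldl (bStep L) (a, some s) = (a, some s) := by
  induction xs with
  | nil => rfl
  | cons x xs ih => simpa [bStep] using ih

-- unfolding of A's recursive case, with the length call evaluated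
theorem findMooAux_succ (n : Int) (m : Nat) :
    findMooAux n (m + 1)
      = if n ≤ mooLenAux m then findMooAux n m
        else if n ≤ mooLenAux m + (((m : Int) + 1) + 3) then
          (if n = mooLenAux m + 1 then "m" else "o")
        else findMooAux (n - mooLenAux m - (((m : Int) + 1) + 3)) m := by
  rw [findMooAux, show (((m : Int) + 1) - 1) = (m : Int) by ring]
  simp only [moo_length, Int.toNat_natCast]
  rfl

-- the iterative descent over range(m, 0, -1) computes A's recursive descent
theorem descend (L : List Int) :
    ∀ (m : Nat), (∀ i : Nat, i < m → L.getD i 0 = mooLenAux i) → ∀ n : Int,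
      bFinish ((PySem.List.pyRange (m : Int) 0 (-1)).foldl (bStep L) (n, none)) = findMooAux n m := by
  intro m
  induction m with
  | zero =>
    intro _ n
    simp [PySem.List.pyRange_neg_one_eq_nil (by norm_num : (0:Int) ≤ 0), bFinish, findMooAux]
  | succ m ih =>
    intro hL n
    have hget : L.getD ((((m : Int) + 1) - 1)).toNat 0 = mooLenAux m := by
      rw [show (((m : Int) + 1) - 1).toNat = m by omega]
      exact hL m (Nat.lt_succ_self m)
    have ih' := ih (fun i hi => hL i (Nat.lt_succ_of_lt hi))
    have hcons : PySem.List.pyRange ((m : Int) + 1) 0 (-1)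
        = ((m : Int) + 1) :: PySem.List.pyRange ((m : Int) + 1 - 1) 0 (-1) :=
      PySem.List.pyRange_neg_one_cons (by omega)
    have hstep : bStep L (n, none) ((m : Int) + 1)
        = if n ≤ mooLenAux m then (n, none)
          else if n ≤ mooLenAux m + (((m : Int) + 1) + 3) then
            (n, some (if n = mooLenAux m + 1 then "m" else "o"))
          else (n - mooLenAux m - (((m : Int) + 1) + 3), none) := by
      simp only [bStep]
      rw [hget]
    push_cast
    rw [hcons, show ((m : Int) + 1 - 1) = (m : Int) by ring, List.foldl_cons, hstep,
      findMooAux_succ]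
    split_ifs with h1 h2 heq
    · exact ih' n
    · rw [bStep_frozen]
      rfl
    · rw [bStep_frozen]
      rfl
    · exact ih' _

-- ===== VERDICT (by name: the statement is the Claim_ definition above) =====
theorem find_moo_spec : Claim_equal_find_moo := by
  intro n k _ hk
  unfold Spec_find_moo find_moo find_moo_alt
  have hkn : ((k.toNat : Int)) = k := Int.toNat_of_nonneg hk
  have hL : ∀ i : Nat, i < k.toNat → (mooTable k).getD i 0 = mooLenAux i := by
    intro i hi
    exact mooTable_getD k i (by omega)
  have := descend (mooTable k) k.toNat hL n
  rw [hkn] at this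
  exact this.symm
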